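-- pv_equiv track=rewrite | github.com/kcsheraj/Codepath | Week3/Session 1/A1.py | reveal_attendee_list_in_order
-- ===== SOURCE A (Python) =====
-- from collections import deque
-- from collections import deque
--
-- def reveal_attendee_list_in_order(attendees):
--     sortedArr = sorted(attendees)
--     queue = deque()
--
--     for i in range(len(sortedArr) - 1, -1, -1):
--         if queue:
--             queue.appendleft(queue.pop())
--
--         queue.appendleft(sortedArr[i])
--     return list(queue)
-- ===== SOURCE B (Python) =====
-- from collections import deque
--
-- def reveal_attendee_list_in_order(attendees):
--     vals = sorted(attendees)
--     n = len(vals)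
--     res = [0] * n
--     dq = deque(range(n))
--     for v in vals:
--         pos = dq.popleft()
--         res[pos] = v
--         if dq:
--             dq.append(dq.popleft())
--     return res
-- ===== Notes on version B (the rewrite author's own statement) =====
-- stated objective: alternative
-- what changed: B sorts ascending and threads a deque of result INDICES forward (pop front index, write the value into a preallocated result array, rotate the index queue) instead of A's backward construction that iterates the sorted values largest-to-smallest while rotating the actual card values from the back of the deque to its front.
import Mathlib
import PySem

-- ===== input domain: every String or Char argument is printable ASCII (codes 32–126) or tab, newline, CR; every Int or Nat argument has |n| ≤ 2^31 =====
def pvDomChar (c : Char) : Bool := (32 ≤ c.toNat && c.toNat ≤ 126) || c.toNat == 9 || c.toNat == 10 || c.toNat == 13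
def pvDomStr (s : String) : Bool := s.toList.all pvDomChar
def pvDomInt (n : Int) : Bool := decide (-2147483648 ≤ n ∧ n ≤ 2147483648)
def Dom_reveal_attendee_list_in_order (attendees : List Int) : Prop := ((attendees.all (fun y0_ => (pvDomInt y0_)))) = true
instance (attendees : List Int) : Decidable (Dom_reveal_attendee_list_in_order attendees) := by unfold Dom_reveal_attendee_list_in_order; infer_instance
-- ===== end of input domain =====

-- B threads a queue of result indices forward (filling a preallocated result array smallest-to-largest)
-- instead of A's backward construction that rotates actual card values from largest to smallest (alternative decomposition, same cost).


-- ===== PORT A =====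
-- literal port: sort, then for i from n-1 down to 0: rotate the back of the deque to the front, prepend sortedArr[i]
def reveal_attendee_list_in_order (attendees : List Int) : List Int :=
  let sortedArr := PySem.List.sorted attendees (fun x => x) false
  (PySem.List.pyRange ((sortedArr.length : Int) - 1) (-1) (-1)).foldl
    (fun queue i =>
      let queue := if queue ≠ [] then queue.getLast?.getD 0 :: queue.dropLast else queue
      PySem.List.pyGetD sortedArr i 0 :: queue)  -- sortedArr[i], i always in range
    []

-- ===== PORT B =====
-- literal port of Source B: index queue [0..n-1]; for each value ascending: pop front index, write there, rotate queue
def reveal_attendee_list_in_order_alt (attendees : List Int) : List Int :=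
  let vals := PySem.List.sorted attendees (fun x => x) false
  let n := vals.length
  let st := vals.foldl
    (fun (st : List Int × List Nat) v =>
      match st with
      | (res, []) => (res, [])  -- unreachable: queue and remaining values have equal length
      | (res, pos :: rest) =>
        (res.set pos v,
         match rest with
         | [] => []
         | p :: ps => ps ++ [p]))
    (List.replicate n 0, List.range n)
  st.1

-- ===== PRECONDITION & SPEC =====
def Spec_reveal_attendee_list_in_order (attendees : List Int) (out : List Int) : Prop := out = reveal_attendee_list_in_order_alt attendees
instance (attendees : List Int) (out : List Int) : Decidable (Spec_reveal_attendee_list_in_order attendees out) := by unfold Spec_reveal_attendee_list_in_order; infer_instance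

-- ===== CLAIM (what is proved, stated in full; the proofs are below) =====
def Claim_equal_reveal_attendee_list_in_order : Prop := ∀ (attendees : List Int), Dom_reveal_attendee_list_in_order attendees → Spec_reveal_attendee_list_in_order attendees (reveal_attendee_list_in_order attendees)

-- ===== LEMMAS AND PROOFS =====

-- move the head to the back (the "reveal" rotation)
def rotQ {α : Type} : List α → List α
  | [] => []
  | x :: xs => xs ++ [x]

theorem length_rotQ {α : Type} (l : List α) : (rotQ l).length = l.length := by
  cases l <;> simp [rotQ]

-- the sequence a deck reveals: take the head, rotate, repeat
def reveal {α : Type} : List α → List α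
  | [] => []
  | x :: xs => x :: reveal (rotQ xs)
termination_by l => l.length
decreasing_by simp [length_rotQ]

theorem rotQ_map {α β : Type} (f : α → β) (l : List α) : rotQ (l.map f) = (rotQ l).map f := by
  cases l <;> simp [rotQ]

theorem reveal_map {α β : Type} (f : α → β) (l : List α) :
    reveal (l.map f) = (reveal l).map f := by
  induction l using reveal.induct with
  | case1 => simp [reveal]
  | case2 x xs ih => simp [reveal, rotQ_map, ih]

theorem perm_rotQ {α : Type} (l : List α) : (rotQ l).Perm l := by
  cases l with
  | nil => simp [rotQ]
  | cons x xs => simp [rotQ, List.perm_append_singleton]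

theorem perm_reveal {α : Type} (l : List α) : (reveal l).Perm l := by
  induction l using reveal.induct with
  | case1 => simp [reveal]
  | case2 x xs ih =>
      simpa [reveal] using (List.Perm.cons x (ih.trans (perm_rotQ xs)))

theorem rotQ_inj {α : Type} (xs ys : List α) (hl : xs.length = ys.length)
    (h : rotQ xs = rotQ ys) : xs = ys := by
  cases xs with
  | nil => cases ys with
    | nil => rfl
    | cons y ys => simp at hl
  | cons x xs => cases ys with
    | nil => simp at hl
    | cons y ys =>
        simp only [rotQ] at h
        rcases List.append_inj h (by simpa using hl) with ⟨h1, h2⟩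
        simp at h2
        simp [h1, h2]

theorem reveal_inj {α : Type} (d1 d2 : List α) (hl : d1.length = d2.length)
    (h : reveal d1 = reveal d2) : d1 = d2 := by
  induction d1 using reveal.induct generalizing d2 with
  | case1 =>
      cases d2 with
      | nil => rfl
      | cons y ys => simp at hl
  | case2 x xs ih =>
      cases d2 with
      | nil => simp at hl
      | cons y ys =>
          simp only [reveal, List.cons.injEq] at h
          have hlen : (rotQ xs).length = (rotQ ys).length := by
            simp [length_rotQ]; simpa using hl
          have := rotQ_inj xs ys (by simpa [length_rotQ] using hlen) (ih (rotQ ys) hlen h.2)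
          simp [h.1, this]

-- ---------- A side: the port builds the unique deck that reveals the sorted list ----------

-- A's per-step queue transformation, as written in the port
def rotQback (q : List Int) : List Int :=
  if q ≠ [] then q.getLast?.getD 0 :: q.dropLast else q

def buildA (l : List Int) : List Int := l.foldr (fun v q => v :: rotQback q) []

theorem rotQ_rotQback (q : List Int) : rotQ (rotQback q) = q := by
  induction q using List.reverseRecOn with
  | nil => simp [rotQback, rotQ]
  | append_singleton l a _ => simp [rotQback, rotQ]

theorem length_rotQback (q : List Int) : (rotQback q).length = q.length := by
  cases q with
  | nil => simp [rotQback]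
  | cons x xs => simp [rotQback]

theorem length_buildA (l : List Int) : (buildA l).length = l.length := by
  induction l with
  | nil => simp [buildA]
  | cons x xs ih => simp [buildA, length_rotQback] at *; omega

theorem reveal_buildA (l : List Int) : reveal (buildA l) = l := by
  induction l with
  | nil => simp [buildA, reveal]
  | cons x xs ih => simp [buildA, reveal, rotQ_rotQback] at *; exact ih

theorem portA_eq_buildA (attendees : List Int) :
    reveal_attendee_list_in_order attendees =
      buildA (PySem.List.sorted attendees (fun x => x) false) := by
  show (PySem.List.pyRange (((PySem.List.sorted attendees (fun x => x) false).length : Int) - 1) (-1) (-1)).foldl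
      (fun queue i => PySem.List.pyGetD (PySem.List.sorted attendees (fun x => x) false) i 0 ::
        (if queue ≠ [] then queue.getLast?.getD 0 :: queue.dropLast else queue)) []
    = buildA (PySem.List.sorted attendees (fun x => x) false)
  set s := PySem.List.sorted attendees (fun x => x) false with hs
  have hrange : PySem.List.pyRange ((s.length : Int) - 1) (-1) (-1)
      = (PySem.List.pyRange 0 (s.length : Int) 1).reverse := by
    rw [PySem.List.pyRange_neg_one_eq_reverse]
    norm_num
  rw [hrange, List.foldl_reverse]
  -- turn the foldr over indices into a foldr over the list itself
  conv_rhs => rw [show s = (PySem.List.pyRange 0 (s.length : Int) 1).map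
      (fun j => PySem.List.pyGetD s j 0) from (PySem.List.map_pyGetD_pyRange_zero s 0).symm]
  rw [buildA, List.foldr_map]
  rfl

-- ---------- B side ----------

def stepB (st : List Int × List Nat) (v : Int) : List Int × List Nat :=
  match st with
  | (res, []) => (res, [])
  | (res, pos :: rest) =>
      (res.set pos v,
       match rest with
       | [] => []
       | p :: ps => ps ++ [p])

def writeAll (res : List Int) (pvs : List (Nat × Int)) : List Int :=
  pvs.foldl (fun r pv => r.set pv.1 pv.2) res

theorem foldl_stepB (vs : List Int) : ∀ (dq : List Nat) (res : List Int),
    (vs.foldl stepB (res, dq)).1 = writeAll res ((reveal dq).zip vs) := by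
  induction vs with
  | nil => intro dq res; simp [writeAll]
  | cons v vs ih =>
      intro dq res
      cases dq with
      | nil => simpa [stepB, reveal, writeAll] using ih [] res
      | cons pos rest =>
          have hstep : stepB (res, pos :: rest) v = (res.set pos v, rotQ rest) := by
            cases rest <;> rfl
          simp only [List.foldl_cons, hstep, reveal, List.zip_cons_cons, writeAll,
            List.foldl_cons]
          exact ih (rotQ rest) (res.set pos v)

theorem length_writeAll (pvs : List (Nat × Int)) : ∀ (res : List Int),
    (writeAll res pvs).length = res.length := by
  induction pvs with
  | nil => intro res; simp [writeAll]
  | cons pv pvs ih =>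
      intro res
      simp only [writeAll, List.foldl_cons]
      simpa using ih (res.set pv.1 pv.2)

theorem getD_writeAll_notin (pvs : List (Nat × Int)) : ∀ (res : List Int) (p : Nat),
    p ∉ pvs.map Prod.fst → (writeAll res pvs).getD p 0 = res.getD p 0 := by
  induction pvs with
  | nil => intro res p _; simp [writeAll]
  | cons pv pvs ih =>
      intro res p hp
      simp only [List.map_cons, List.mem_cons, not_or] at hp
      simp only [writeAll, List.foldl_cons]
      rw [show (pvs.foldl (fun r pv => r.set pv.1 pv.2) (res.set pv.1 pv.2))
            = writeAll (res.set pv.1 pv.2) pvs from rfl, ih _ p hp.2]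
      simp [List.getD, List.getElem?_set_ne (Ne.symm hp.1)]

theorem map_getD_writeAll (ps : List Nat) : ∀ (vs : List Int) (res : List Int),
    ps.Nodup → ps.length = vs.length → (∀ p ∈ ps, p < res.length) →
    ps.map (fun i => (writeAll res (ps.zip vs)).getD i 0) = vs := by
  induction ps with
  | nil => intro vs res _ hlen _; cases vs <;> simp_all
  | cons p ps ih =>
      intro vs res hnd hlen hbound
      cases vs with
      | nil => simp at hlen
      | cons v vs =>
          simp only [List.nodup_cons] at hnd
          simp only [List.zip_cons_cons, List.map_cons]
          have hw : writeAll res ((p, v) :: ps.zip vs) = writeAll (res.set p v) (ps.zip vs) := rfl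
          rw [hw]
          have hhead : (writeAll (res.set p v) (ps.zip vs)).getD p 0 = v := by
            rw [getD_writeAll_notin]
            · simp [List.getD, hbound p (by simp)]
            · intro hmem
              rcases List.mem_map.mp hmem with ⟨⟨q', v'⟩, hq', h⟩
              exact hnd.1 (h ▸ (List.of_mem_zip hq').1)
          exact congrArg₂ List.cons hhead
            (ih vs (res.set p v) hnd.2 (by simpa using hlen)
              (fun q hq => by simpa using hbound q (by simp [hq])))

-- every list is the range of its indices mapped through getD
theorem map_getD_range (d : List Int) :
    (List.range d.length).map (fun i => d.getD i 0) = d := by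
  induction d with
  | nil => simp
  | cons x xs ih =>
      rw [List.length_cons, List.range_succ_eq_map]
      simp only [List.map_cons, List.map_map]
      refine congrArg₂ _ (by simp [List.getD]) ?_
      simpa [Function.comp, List.getD] using ih

theorem portB_eq (attendees : List Int) :
    reveal_attendee_list_in_order_alt attendees =
      writeAll (List.replicate (PySem.List.sorted attendees (fun x => x) false).length 0)
        ((reveal (List.range (PySem.List.sorted attendees (fun x => x) false).length)).zip
          (PySem.List.sorted attendees (fun x => x) false)) := by
  unfold reveal_attendee_list_in_order_alt
  exact foldl_stepB _ _ _

theorem reveal_portB (attendees : List Int) :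
    reveal (reveal_attendee_list_in_order_alt attendees) =
      PySem.List.sorted attendees (fun x => x) false := by
  set s := PySem.List.sorted attendees (fun x => x) false with hs
  set n := s.length with hn
  set σ := reveal (List.range n) with hσ
  have hσperm : σ.Perm (List.range n) := perm_reveal _
  have hσnd : σ.Nodup := hσperm.nodup_iff.mpr (List.nodup_range)
  have hσlen : σ.length = n := by simpa using hσperm.length_eq
  set d := reveal_attendee_list_in_order_alt attendees with hd
  have hdw : d = writeAll (List.replicate n 0) (σ.zip s) := portB_eq attendees
  have hdlen : d.length = n := by
    rw [hdw]; simpa using length_writeAll (σ.zip s) (List.replicate n 0)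
  have hnat : d = (List.range n).map (fun i => d.getD i 0) := by
    conv_lhs => rw [← map_getD_range d, hdlen]
  rw [hnat, reveal_map, ← hσ, hdw]
  exact map_getD_writeAll σ s (List.replicate n 0) hσnd (by simp [hσlen, hn])
    (fun p hp => by
      have := hσperm.mem_iff.mp hp
      simpa using List.mem_range.mp this)

-- ===== VERDICT (by name: the statement is the Claim_ definition above) =====
theorem reveal_attendee_list_in_order_spec : Claim_equal_reveal_attendee_list_in_order := by
  intro attendees _
  unfold Spec_reveal_attendee_list_in_order
  set s := PySem.List.sorted attendees (fun x => x) false with hs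
  apply reveal_inj
  · rw [portA_eq_buildA, length_buildA]
    have := portB_eq attendees
    rw [← hs] at this
    rw [this, length_writeAll]
    simp [hs, PySem.List.length_sorted]
  · rw [portA_eq_buildA, ← hs, reveal_buildA, reveal_portB]
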